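-- pv_equiv track=rewrite | github.com/dhana507/GIGA | Coding Meetup #8 - Higher-Order Functions Series - Will all continents be represented?.py | all_continents
-- ===== SOURCE A (Python) =====
-- def all_continents(lst):
--     # your code here
--     a=False
--     b=False
--     c=False
--     d=False
--     e=False
--     for i in lst:
--         if(i['continent']=='Africa'):
--             a=True
--         elif(i['continent']=='Americas'):
--             b=True
--         elif(i['continent']=='Asia'):
--             c=True
--         elif(i['continent']=='Europe'):
--             d=True
--         elif(i['continent']=='Oceania'):
--             e=True
--     if(a and b and c and d and e):
--         return True
--     else:
--         return False
-- ===== SOURCE B (Python) =====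
-- def all_continents(lst):
--     # Transposed iteration: for each required continent, scan the list for it,
--     # instead of one pass over the list maintaining five flags.
--     for continent in ('Africa', 'Americas', 'Asia', 'Europe', 'Oceania'):
--         if not any(i['continent'] == continent for i in lst):
--             return False
--     return True
-- ===== Notes on version B (the rewrite author's own statement) =====
-- stated objective: alternative
-- what changed: Transposes the loop structure: instead of A's single pass over the list updating five boolean flags via an if/elif chain, B iterates over the five required continents and performs one short-circuiting membership scan of the list per continent, returning False as soon as one is missing.
import Mathlib
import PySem

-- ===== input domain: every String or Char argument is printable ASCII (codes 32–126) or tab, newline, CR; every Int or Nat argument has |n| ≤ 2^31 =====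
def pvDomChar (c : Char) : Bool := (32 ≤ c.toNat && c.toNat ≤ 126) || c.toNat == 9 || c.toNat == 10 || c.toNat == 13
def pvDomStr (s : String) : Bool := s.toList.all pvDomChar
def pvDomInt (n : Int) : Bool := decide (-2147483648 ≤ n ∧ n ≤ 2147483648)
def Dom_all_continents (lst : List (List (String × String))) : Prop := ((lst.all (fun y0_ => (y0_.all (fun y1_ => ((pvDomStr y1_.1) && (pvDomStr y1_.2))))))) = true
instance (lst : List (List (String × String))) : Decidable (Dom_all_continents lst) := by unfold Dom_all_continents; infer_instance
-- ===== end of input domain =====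

-- B transposes the iteration: A makes one pass over lst keeping five flags; B loops
-- over the five required continents and scans lst for each (alternative; same O(n) class).

-- ===== PORT A =====
-- i['continent'] under Pre_ (key present); total form of the lookup
def pvContA (i : List (String × String)) : String :=
  ((PySem.Dict.mk i).get? "continent").getD ""

def all_continents (lst : List (List (String × String))) : Bool :=
  let s := lst.foldl
    (fun (st : Bool × Bool × Bool × Bool × Bool) i =>
      if pvContA i = "Africa" then (true, st.2.1, st.2.2.1, st.2.2.2.1, st.2.2.2.2)
      else if pvContA i = "Americas" then (st.1, true, st.2.2.1, st.2.2.2.1, st.2.2.2.2)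
      else if pvContA i = "Asia" then (st.1, st.2.1, true, st.2.2.2.1, st.2.2.2.2)
      else if pvContA i = "Europe" then (st.1, st.2.1, st.2.2.1, true, st.2.2.2.2)
      else if pvContA i = "Oceania" then (st.1, st.2.1, st.2.2.1, st.2.2.2.1, true)
      else st)
    (false, false, false, false, false)
  s.1 && s.2.1 && s.2.2.1 && s.2.2.2.1 && s.2.2.2.2

-- ===== PORT B =====
-- the 'for continent in … if not any(…): return False' loop: all required continents
-- must each pass a short-circuiting scan of lst
def all_continents_alt (lst : List (List (String × String))) : Bool :=
  ["Africa", "Americas", "Asia", "Europe", "Oceania"].all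
    (fun continent => lst.any (fun i => pvContA i = continent))

-- ===== PRECONDITION & SPEC =====
-- Pre_ excludes rows without a 'continent' key, on which the Python A raises KeyError.
def Pre_all_continents (lst : List (List (String × String))) : Prop :=
  ∀ i ∈ lst, (PySem.Dict.mk i).contains "continent" = true
instance (lst : List (List (String × String))) : Decidable (Pre_all_continents lst) := by
  unfold Pre_all_continents; infer_instance

def pvWitness_all_continents : (List (List (String × String))) :=
  [[("continent", "Africa")], [("continent", "Asia")]]

def Spec_all_continents (lst : List (List (String × String))) (out : Bool) : Prop := out = all_continents_alt lst
instance (lst : List (List (String × String))) (out : Bool) : Decidable (Spec_all_continents lst out) := by unfold Spec_all_continents; infer_instance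

-- ===== CLAIM (what is proved, stated in full; the proofs are below) =====
def Claim_equal_all_continents : Prop := ∀ (lst : List (List (String × String))), Dom_all_continents lst → Pre_all_continents lst → Spec_all_continents lst (all_continents lst)

-- ===== LEMMAS AND PROOFS =====

-- A's fold leaves each flag as 'initial value OR some row has that continent'.
lemma foldA_char (lst : List (List (String × String))) (a b c d e : Bool) :
    lst.foldl
      (fun (st : Bool × Bool × Bool × Bool × Bool) i =>
        if pvContA i = "Africa" then (true, st.2.1, st.2.2.1, st.2.2.2.1, st.2.2.2.2)
        else if pvContA i = "Americas" then (st.1, true, st.2.2.1, st.2.2.2.1, st.2.2.2.2)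
        else if pvContA i = "Asia" then (st.1, st.2.1, true, st.2.2.2.1, st.2.2.2.2)
        else if pvContA i = "Europe" then (st.1, st.2.1, st.2.2.1, true, st.2.2.2.2)
        else if pvContA i = "Oceania" then (st.1, st.2.1, st.2.2.1, st.2.2.2.1, true)
        else st)
      (a, b, c, d, e) =
    (a || lst.any (fun i => pvContA i = "Africa"),
     b || lst.any (fun i => pvContA i = "Americas"),
     c || lst.any (fun i => pvContA i = "Asia"),
     d || lst.any (fun i => pvContA i = "Europe"),
     e || lst.any (fun i => pvContA i = "Oceania")) := by
  induction lst generalizing a b c d e with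
  | nil => simp
  | cons x xs ih =>
    simp only [List.foldl_cons, List.any_cons]
    rw [ih]
    split_ifs <;> simp_all

-- ===== VERDICT (by name: the statement is the Claim_ definition above) =====
theorem all_continents_spec : Claim_equal_all_continents := by
  intro lst _ _
  show all_continents lst = all_continents_alt lst
  rw [all_continents, foldA_char]
  simp [all_continents_alt, Bool.and_assoc]
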